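-- pv_equiv track=rewrite | github.com/samyuktha2004/handinhand | optimize_frame_range.py | find_optimal_range
-- ===== SOURCE A (Python) =====
-- from typing import Tuple, List
--
-- def find_optimal_range(frame_stats: List[dict]) -> Tuple[int, int]:
--     """
--     Find the best frame range with:
--     1. Both hands detected
--     2. Face detected (for NMS)
--     3. Longest continuous sequence
--     """
--     best_start = -1
--     best_end = -1
--     best_length = 0
--
--     # Find all sequences with complete detection
--     current_start = -1
--     for i, stats in enumerate(frame_stats):
--         if stats["complete"]:  # Has left_hand + right_hand + face
--             if current_start == -1:
--                 current_start = i
--         else: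
--             if current_start != -1:
--                 length = i - current_start
--                 if length > best_length:
--                     best_length = length
--                     best_start = current_start
--                     best_end = i
--                 current_start = -1
--
--     # Check last sequence
--     if current_start != -1:
--         length = len(frame_stats) - current_start
--         if length > best_length:
--             best_length = length
--             best_start = current_start
--             best_end = len(frame_stats)
--
--     # If no complete sequence, find longest sequence with both hands
--     if best_start == -1:
--         current_start = -1
--         for i, stats in enumerate(frame_stats):
--             if stats["both_hands"]:
--                 if current_start == -1:
--                     current_start = i
--             else:
--                 if current_start != -1:
--                     length = i - current_start
--                     if length > best_length:
--                         best_length = length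
--                         best_start = current_start
--                         best_end = i
--                     current_start = -1
--
--         if current_start != -1:
--             length = len(frame_stats) - current_start
--             if length > best_length:
--                 best_length = length
--                 best_start = current_start
--                 best_end = len(frame_stats)
--
--     return best_start, best_end
-- ===== SOURCE B (Python) =====
-- def _runs(flags):
--     """Maximal runs of consecutive True values, as half-open (start, end) pairs."""
--     runs = []
--     i, n = 0, len(flags)
--     while i < n:
--         if flags[i]:
--             j = i + 1
--             while j < n and flags[j]:
--                 j += 1
--             runs.append((i, j))
--             i = j
--         else:
--             i += 1
--     return runs
--
-- def _pick(best, best_len, runs):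
--     """First run strictly longer than every earlier one (strict >, earliest wins)."""
--     for (s, e) in runs:
--         if e - s > best_len:
--             best, best_len = (s, e), e - s
--     return best
--
-- def find_optimal_range(frame_stats):
--     best = _pick((-1, -1), 0, _runs([f["complete"] for f in frame_stats]))
--     if best[0] != -1:
--         return best
--     return _pick((-1, -1), 0, _runs([f["both_hands"] for f in frame_stats]))
-- ===== Notes on version B (the rewrite author's own statement) =====
-- stated objective: alternative
-- what changed: Replaced the inline current_start state machine with its duplicated end-of-list handling by a two-phase traversal: materialize all maximal True runs as (start,end) pairs, then fold once selecting the earliest strictly-longest run.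
import Mathlib
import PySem

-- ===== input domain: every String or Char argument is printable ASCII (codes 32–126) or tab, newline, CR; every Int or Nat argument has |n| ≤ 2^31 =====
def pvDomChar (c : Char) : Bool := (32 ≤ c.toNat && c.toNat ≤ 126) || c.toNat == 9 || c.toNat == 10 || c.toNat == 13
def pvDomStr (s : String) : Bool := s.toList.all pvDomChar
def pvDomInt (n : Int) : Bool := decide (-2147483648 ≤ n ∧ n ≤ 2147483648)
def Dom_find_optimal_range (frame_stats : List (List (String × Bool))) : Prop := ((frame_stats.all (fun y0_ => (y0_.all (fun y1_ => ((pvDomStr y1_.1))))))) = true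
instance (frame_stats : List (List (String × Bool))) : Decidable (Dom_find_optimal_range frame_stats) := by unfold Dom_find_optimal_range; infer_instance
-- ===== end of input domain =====

-- B differs from A in decomposition only (runs are materialized, then the longest is selected);
-- the equivalence is about the return value, neither version mutates its argument.

-- ===== PORT A =====
-- stats["complete"] / stats["both_hands"]: first-match lookup; Python raises KeyError when the
-- key is missing — Pre_ excludes exactly those inputs, so getD's default is never reached there.
def pvLookup (f : List (String × Bool)) (k : String) : Bool :=
  (PySem.Dict.mk f).getD k false

-- the 'for i, stats in enumerate(...)' loop of A (used twice, with key "complete" / "both_hands"),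
-- state = (best_start, best_end, best_length, current_start)
def pvLoopA (key : String) : List (List (String × Bool)) → Int → Int × Int × Int × Int → Int × Int × Int × Int
  | [], _, st => st
  | f :: rest, i, (bs, be, bl, cs) =>
      pvLoopA key rest (i + 1)
        (if pvLookup f key then
           (if cs = -1 then (bs, be, bl, i) else (bs, be, bl, cs))
         else
           (if cs ≠ -1 then
              (if i - cs > bl then (cs, i, i - cs, -1) else (bs, be, bl, -1))
            else (bs, be, bl, cs)))

-- the 'check last sequence' tail of A (used twice)
def pvFin (n : Int) : Int × Int × Int × Int → Int × Int × Int
  | (bs, be, bl, cs) =>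
      if cs ≠ -1 then (if n - cs > bl then (cs, n, n - cs) else (bs, be, bl))
      else (bs, be, bl)

def find_optimal_range (frame_stats : List (List (String × Bool))) : Int × Int :=
  let n : Int := frame_stats.length
  let t := pvFin n (pvLoopA "complete" frame_stats 0 (-1, -1, 0, -1))
  if t.1 = -1 then
    let t2 := pvFin n (pvLoopA "both_hands" frame_stats 0 (t.1, t.2.1, t.2.2, -1))
    (t2.1, t2.2.1)
  else (t.1, t.2.1)

-- ===== PORT B =====
-- maximal runs of True as half-open (start, end) pairs (the outer while loop of _runs;
-- the inner while loop is the leading-True count, i.e. takeWhile's length)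
def pvRuns : List Bool → Int → List (Int × Int)
  | [], _ => []
  | false :: rest, i => pvRuns rest (i + 1)
  | true :: rest, i =>
      let k := (rest.takeWhile id).length
      (i, i + 1 + (k : Int)) :: pvRuns (rest.drop k) (i + 1 + (k : Int))
termination_by flags _ => flags.length
decreasing_by
  · simp
  · simp only [List.length_drop, List.length_cons]
    have := (rest.takeWhile_sublist id).length_le
    omega

-- the selection fold of _pick
def pvPick (best : Int × Int) (bl : Int) : List (Int × Int) → Int × Int
  | [] => best
  | (s, e) :: rs => if e - s > bl then pvPick (s, e) (e - s) rs else pvPick best bl rs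

def find_optimal_range_alt (frame_stats : List (List (String × Bool))) : Int × Int :=
  let best := pvPick (-1, -1) 0 (pvRuns (frame_stats.map (fun f => pvLookup f "complete")) 0)
  if best.1 ≠ -1 then best
  else pvPick (-1, -1) 0 (pvRuns (frame_stats.map (fun f => pvLookup f "both_hands")) 0)

-- ===== PRECONDITION & SPEC =====
-- Pre_ excludes exactly the inputs on which A raises KeyError: a frame without the "complete"
-- key (the first loop reads it from every frame), or — when no frame has complete = True, so
-- the fallback loop runs — a frame without the "both_hands" key.
def Pre_find_optimal_range (frame_stats : List (List (String × Bool))) : Prop :=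
  (∀ f ∈ frame_stats, ((PySem.Dict.mk f).get? "complete").isSome) ∧
  ((∀ f ∈ frame_stats, (PySem.Dict.mk f).getD "complete" false = false) →
    ∀ f ∈ frame_stats, ((PySem.Dict.mk f).get? "both_hands").isSome)
instance (frame_stats : List (List (String × Bool))) : Decidable (Pre_find_optimal_range frame_stats) := by
  unfold Pre_find_optimal_range; infer_instance

def pvWitness_find_optimal_range : (List (List (String × Bool))) :=
  [[("complete", false), ("both_hands", true)], [("complete", true), ("both_hands", true)]]

def Spec_find_optimal_range (frame_stats : List (List (String × Bool))) (out : Int × Int) : Prop := out = find_optimal_range_alt frame_stats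
instance (frame_stats : List (List (String × Bool))) (out : Int × Int) : Decidable (Spec_find_optimal_range frame_stats out) := by unfold Spec_find_optimal_range; infer_instance

-- ===== CLAIM (what is proved, stated in full; the proofs are below) =====
def Claim_equal_find_optimal_range : Prop := ∀ (frame_stats : List (List (String × Bool))), Dom_find_optimal_range frame_stats → Pre_find_optimal_range frame_stats → Spec_find_optimal_range frame_stats (find_optimal_range frame_stats)

-- ===== LEMMAS AND PROOFS =====

-- triple-valued variant of the selection fold, carrying best_length (proof device)
def pvPickT (bs be bl : Int) : List (Int × Int) → Int × Int × Int
  | [] => (bs, be, bl)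
  | (s, e) :: rs => if e - s > bl then pvPickT s e (e - s) rs else pvPickT bs be bl rs

theorem pvPick_eq_pickT (rs : List (Int × Int)) : ∀ bs be bl,
    pvPick (bs, be) bl rs = ((pvPickT bs be bl rs).1, (pvPickT bs be bl rs).2.1) := by
  induction rs with
  | nil => intro bs be bl; rfl
  | cons p rs ih =>
      intro bs be bl
      obtain ⟨s, e⟩ := p
      simp only [pvPick, pvPickT]
      split <;> apply ih

-- one-step reductions of A's loop (proof devices)
theorem pvStep_true (key : String) (f : List (String × Bool)) (rest : List (List (String × Bool)))
    (i bs be bl cs : Int) (h : pvLookup f key = true) :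
    pvLoopA key (f :: rest) i (bs, be, bl, cs)
      = pvLoopA key rest (i + 1) (bs, be, bl, if cs = -1 then i else cs) := by
  simp only [pvLoopA, h, if_true]
  split_ifs <;> rfl

theorem pvStep_false_open (key : String) (f : List (String × Bool)) (rest : List (List (String × Bool)))
    (i bs be bl cs : Int) (h : pvLookup f key = false) (hne : cs ≠ -1) :
    pvLoopA key (f :: rest) i (bs, be, bl, cs)
      = pvLoopA key rest (i + 1) (if i - cs > bl then (cs, i, i - cs, -1) else (bs, be, bl, -1)) := by
  simp only [pvLoopA, h, Bool.false_eq_true, if_false, ne_eq, hne, not_false_iff, if_true]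

theorem pvStep_false_closed (key : String) (f : List (String × Bool)) (rest : List (List (String × Bool)))
    (i bs be bl : Int) (h : pvLookup f key = false) :
    pvLoopA key (f :: rest) i (bs, be, bl, -1) = pvLoopA key rest (i + 1) (bs, be, bl, -1) := by
  simp only [pvLoopA, h, Bool.false_eq_true, ne_eq, not_true, if_neg, not_false_iff]

-- the central correspondence: A's state machine, finalized by the tail check, computes
-- the same triple as selecting over the materialized runs.
theorem pvMain (key : String) (frames : List (List (String × Bool))) : ∀ (i bs be bl : Int), 0 ≤ i →
    (pvFin (i + frames.length) (pvLoopA key frames i (bs, be, bl, -1))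
      = pvPickT bs be bl (pvRuns (frames.map (fun f => pvLookup f key)) i)) ∧
    (∀ cs, 0 ≤ cs →
      pvFin (i + frames.length) (pvLoopA key frames i (bs, be, bl, cs))
        = pvPickT
             (if i + (((frames.map (fun f => pvLookup f key)).takeWhile id).length : Int) - cs > bl then cs else bs)
             (if i + (((frames.map (fun f => pvLookup f key)).takeWhile id).length : Int) - cs > bl then i + (((frames.map (fun f => pvLookup f key)).takeWhile id).length : Int) else be)
             (if i + (((frames.map (fun f => pvLookup f key)).takeWhile id).length : Int) - cs > bl then i + (((frames.map (fun f => pvLookup f key)).takeWhile id).length : Int) - cs else bl)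
             (pvRuns ((frames.map (fun f => pvLookup f key)).drop ((frames.map (fun f => pvLookup f key)).takeWhile id).length) (i + (((frames.map (fun f => pvLookup f key)).takeWhile id).length : Int)))) := by
  induction frames with
  | nil =>
      intro i bs be bl hi
      refine ⟨by simp [pvLoopA, pvRuns, pvFin, pvPickT], ?_⟩
      intro cs hcs
      have hne : ¬ cs = -1 := by omega
      simp only [pvLoopA, List.map_nil, List.takeWhile_nil, List.length_nil, List.drop_nil,
        Nat.cast_zero, add_zero, pvFin, pvRuns, pvPickT, ne_eq, hne, not_false_iff, if_true]
      split_ifs <;> rfl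
  | cons f rest ih =>
      intro i bs be bl hi
      have hi1 : (0 : Int) ≤ i + 1 := by omega
      have hlen : (i + 1 : Int) + (rest.length : Int) = i + (((f :: rest).length : Nat) : Int) := by
        push_cast [List.length_cons]; try ring
      set l := rest.map (fun f => pvLookup f key) with hl
      constructor
      · -- closed state (current_start = -1)
        cases hb : pvLookup f key
        · -- stays closed
          have h1 := (ih (i + 1) bs be bl hi1).1
          rw [hlen] at h1
          rw [pvStep_false_closed key f rest i bs be bl hb, h1]
          simp only [List.map_cons, hb, pvRuns, ← hl]
        · -- run opens at i
          have h2 := (ih (i + 1) bs be bl hi1).2 i hi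
          rw [hlen] at h2
          rw [pvStep_true key f rest i bs be bl (-1) hb, if_pos rfl, h2]
          simp only [List.map_cons, hb, pvRuns, pvPickT, ← hl]
          split_ifs <;> rfl
      · -- open state (current_start = cs ≥ 0)
        intro cs hcs
        have hne : cs ≠ -1 := by omega
        cases hb : pvLookup f key
        · -- run closes at i
          by_cases hgt : i - cs > bl
          · have h1 := (ih (i + 1) cs i (i - cs) hi1).1
            rw [hlen] at h1
            rw [pvStep_false_open key f rest i bs be bl cs hb hne, if_pos hgt, h1]
            simp only [List.map_cons, hb, ← hl]
            rw [List.takeWhile_cons_of_neg (by simp)]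
            simp only [List.length_nil, Nat.cast_zero, add_zero, List.drop_zero]
            rw [if_pos hgt, if_pos hgt, if_pos hgt]
            simp only [pvRuns]
          · have h1 := (ih (i + 1) bs be bl hi1).1
            rw [hlen] at h1
            rw [pvStep_false_open key f rest i bs be bl cs hb hne, if_neg hgt, h1]
            simp only [List.map_cons, hb, ← hl]
            rw [List.takeWhile_cons_of_neg (by simp)]
            simp only [List.length_nil, Nat.cast_zero, add_zero, List.drop_zero]
            rw [if_neg hgt, if_neg hgt, if_neg hgt]
            simp only [pvRuns]
        · -- run continues
          have h2 := (ih (i + 1) bs be bl hi1).2 cs hcs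
          rw [hlen] at h2
          rw [pvStep_true key f rest i bs be bl cs hb, if_neg hne, h2]
          simp only [List.map_cons, hb, ← hl]
          rw [List.takeWhile_cons_of_pos (by simp)]
          simp only [List.length_cons, List.drop_succ_cons]
          congr 1 <;> try (split_ifs <;> omega)
          congr 1
          push_cast
          ring

-- every run produced from a nonnegative offset has a nonnegative start
theorem pvRuns_nonneg (flags : List Bool) (i : Int) :
    0 ≤ i → ∀ p ∈ pvRuns flags i, 0 ≤ p.1 := by
  fun_induction pvRuns flags i with
  | case1 => simp
  | case2 i rest ih =>
      intro hi
      exact ih (by omega)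
  | case3 i rest k ih =>
      intro hi p hp
      rcases List.mem_cons.mp hp with h | h
      · subst h; exact hi
      · exact ih (by omega) p h

-- if nothing with nonnegative start is ever selected, the state is untouched
theorem pvPickT_cases (rs : List (Int × Int)) (h : ∀ p ∈ rs, 0 ≤ p.1) :
    ∀ bs be bl, pvPickT bs be bl rs = (bs, be, bl) ∨ 0 ≤ (pvPickT bs be bl rs).1 := by
  induction rs with
  | nil => intro bs be bl; left; rfl
  | cons p t ih =>
      intro bs be bl
      obtain ⟨s, e⟩ := p
      have hs : 0 ≤ s := h (s, e) (by simp)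
      have ht : ∀ q ∈ t, 0 ≤ q.1 := fun q hq => h q (by simp [hq])
      simp only [pvPickT]
      by_cases hc : e - s > bl
      · rw [if_pos hc]
        right
        rcases ih ht s e (e - s) with heq | hpos
        · rw [heq]; exact hs
        · exact hpos
      · rw [if_neg hc]; exact ih ht bs be bl

theorem pvPickT_neg (rs : List (Int × Int)) (h : ∀ p ∈ rs, 0 ≤ p.1)
    (h1 : (pvPickT (-1) (-1) 0 rs).1 = -1) : pvPickT (-1) (-1) 0 rs = (-1, -1, 0) := by
  rcases pvPickT_cases rs h (-1) (-1) 0 with heq | hpos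
  · exact heq
  · omega

-- ===== VERDICT (by name: the statement is the Claim_ definition above) =====
theorem find_optimal_range_spec : Claim_equal_find_optimal_range := by
  intro fs _ _
  unfold Spec_find_optimal_range find_optimal_range find_optimal_range_alt
  dsimp only
  have h1 := (pvMain "complete" fs 0 (-1) (-1) 0 le_rfl).1
  have h2 := (pvMain "both_hands" fs 0 (-1) (-1) 0 le_rfl).1
  rw [show ((0 : Int) + (fs.length : Int)) = (fs.length : Int) by ring] at h1 h2
  rw [h1, pvPick_eq_pickT, pvPick_eq_pickT]
  set t := pvPickT (-1) (-1) 0 (pvRuns (fs.map (fun f => pvLookup f "complete")) 0) with ht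
  by_cases hneg : t.1 = -1
  · have hT : t = (-1, -1, 0) :=
      pvPickT_neg _ (pvRuns_nonneg (fs.map (fun f => pvLookup f "complete")) 0 le_rfl) hneg
    rw [if_pos hneg, hT]
    simp only [h2]
    rw [if_neg (by simp)]
  · rw [if_neg hneg, if_pos hneg]
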